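-- pv_equiv track=rewrite | github.com/Wlodarz03/UWR | Sztuczna/Lista1/test.py | if_one_block
-- ===== SOURCE A (Python) =====
-- def if_one_block(line, target):
--     count = 0
--     blocks = []
--     for i in range(len(line)):
--         if line[i] == 1:
--             count += 1
--         else:
--             if count != 0:
--                 blocks.append(count)
--             count = 0
--     if count != 0:
--         blocks.append(count)
--     return len(blocks) == 1 and blocks[0] == target
-- ===== SOURCE B (Python) =====
-- def if_one_block(line, target):
--     # Find the first 1, walk to the end of its run, then require the run
--     # length to equal target and no further 1 afterwards.
--     try:
--         i = line.index(1)
--     except ValueError: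
--         return False
--     j = i
--     n = len(line)
--     while j < n and line[j] == 1:
--         j += 1
--     return j - i == target and 1 not in line[j:]
-- ===== Notes on version B (the rewrite author's own statement) =====
-- stated objective: alternative
-- what changed: Replaces A's count/reset state machine that accumulates a list of all 1-block lengths with a direct search: locate the first 1 via list.index, walk to the end of that single run, and check the run length equals target and no 1 occurs afterwards (no blocks list is built).
import Mathlib
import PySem

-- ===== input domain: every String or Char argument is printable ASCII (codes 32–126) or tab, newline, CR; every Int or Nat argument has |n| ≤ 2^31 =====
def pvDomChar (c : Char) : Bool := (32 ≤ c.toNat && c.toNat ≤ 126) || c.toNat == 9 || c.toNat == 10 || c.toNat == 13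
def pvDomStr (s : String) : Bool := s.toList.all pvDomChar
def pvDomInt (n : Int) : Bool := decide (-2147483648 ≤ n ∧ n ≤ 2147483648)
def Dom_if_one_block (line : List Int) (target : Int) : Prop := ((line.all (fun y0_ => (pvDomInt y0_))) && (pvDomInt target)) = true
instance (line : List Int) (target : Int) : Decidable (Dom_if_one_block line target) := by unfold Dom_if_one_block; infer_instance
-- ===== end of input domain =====

-- B replaces A's count/reset state machine (collecting every 1-block length) by a direct
-- search for the first 1, its run end, and a no-more-1s check; alternative decomposition.

-- ===== PORT A =====
-- loop body of A extracted as a helper: state is (count, blocks)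
def pvStepA (s : Int × List Int) (x : Int) : Int × List Int :=
  if x = 1 then (s.1 + 1, s.2)
  else if s.1 ≠ 0 then (0, s.2 ++ [s.1]) else (0, s.2)

-- A's code after the loop: flush the pending count, then
-- 'len(blocks) == 1 and blocks[0] == target' (blocks[0] is only reached when the
-- length is 1, so pyGetD's default is never the decider)
def pvFinishA (st : Int × List Int) (target : Int) : Bool :=
  let blocks := if st.1 ≠ 0 then st.2 ++ [st.1] else st.2
  decide (blocks.length = 1) && decide (PySem.List.pyGetD blocks 0 0 = target)

def if_one_block (line : List Int) (target : Int) : Bool :=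
  pvFinishA ((PySem.List.pyRange 0 (line.length : Int) 1).foldl
    (fun s i => pvStepA s (PySem.List.pyGetD line i 0)) (0, [])) target

-- ===== PORT B =====
-- the 'while j < n and line[j] == 1: j += 1' loop of B
def pvRunEnd (xs : List Int) (j : Nat) : Nat :=
  if h : j < xs.length then
    (if xs[j] = 1 then pvRunEnd xs (j + 1) else j)
  else j
termination_by xs.length - j

def if_one_block_alt (line : List Int) (target : Int) : Bool :=
  match PySem.List.index? line 1 with
  | none => false
  | some i =>
    let j := pvRunEnd line i
    decide ((j : Int) - (i : Int) = target) &&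
      !(decide (1 ∈ PySem.List.slice line (some (j : Int)) none))

-- ===== PRECONDITION & SPEC =====
def Spec_if_one_block (line : List Int) (target : Int) (out : Bool) : Prop := out = if_one_block_alt line target
instance (line : List Int) (target : Int) (out : Bool) : Decidable (Spec_if_one_block line target out) := by unfold Spec_if_one_block; infer_instance

-- ===== CLAIM (what is proved, stated in full; the proofs are below) =====
def Claim_equal_if_one_block : Prop := ∀ (line : List Int) (target : Int), Dom_if_one_block line target → Spec_if_one_block line target (if_one_block line target)

-- ===== LEMMAS AND PROOFS =====

-- the list of lengths of maximal 1-blocks of xs, given c pending ones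
def runsAux (c : Int) : List Int → List Int
  | [] => if c ≠ 0 then [c] else []
  | x :: xs => if x = 1 then runsAux (c + 1) xs
               else (if c ≠ 0 then [c] else []) ++ runsAux 0 xs

theorem foldA_runsAux (xs : List Int) : ∀ (c : Int) (bs : List Int),
    (let r := xs.foldl pvStepA (c, bs);
     (if r.1 ≠ 0 then r.2 ++ [r.1] else r.2)) = bs ++ runsAux c xs := by
  induction xs with
  | nil => intro c bs; by_cases h : c = 0 <;> simp [runsAux, h]
  | cons x xs ih =>
    intro c bs
    by_cases hx : x = 1
    · simp only [List.foldl_cons, pvStepA, hx, runsAux, ite_true]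
      exact ih (c + 1) bs
    · by_cases hc : c = 0 <;>
        simp [pvStepA, hx, hc, runsAux, ih, List.append_assoc]

theorem blocks_check (bl : List Int) (t : Int) :
    (decide (bl.length = 1) && decide (PySem.List.pyGetD bl 0 0 = t)) = decide (bl = [t]) := by
  match bl with
  | [] => simp
  | [x] => simp [PySem.List.pyGetD, PySem.List.pyGet?, PySem.List.pyIdx?]
  | x :: y :: l => simp

theorem A_eq_runs (line : List Int) (target : Int) :
    if_one_block line target = decide (runsAux 0 line = [target]) := by
  unfold if_one_block
  rw [PySem.List.foldl_pyRange_zero_pyGetD' line 0 pvStepA ((0 : Int), ([] : List Int))]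
  have h := foldA_runsAux line 0 []
  simp only [List.nil_append] at h
  unfold pvFinishA
  simp only [← blocks_check, h]

theorem runsAux_of_not_mem (xs : List Int) (h : (1 : Int) ∉ xs) : runsAux 0 xs = [] := by
  induction xs with
  | nil => simp [runsAux]
  | cons x xs ih =>
    simp only [List.mem_cons, not_or] at h
    simp [runsAux, Ne.symm h.1, ih h.2]

theorem runsAux_eq_nil_iff (xs : List Int) : ∀ c : Int, 0 ≤ c →
    (runsAux c xs = [] ↔ c = 0 ∧ (1 : Int) ∉ xs) := by
  induction xs with
  | nil => intro c _; by_cases h : c = 0 <;> simp [runsAux, h]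
  | cons x xs ih =>
    intro c hc
    by_cases hx : x = 1
    · rw [runsAux, if_pos hx]
      rw [ih (c + 1) (by omega)]
      simp [hx]
      omega
    · rw [runsAux, if_neg hx]
      by_cases hc0 : c = 0
      · simpa [hc0, Ne.symm hx] using ih 0 le_rfl
      · simp [hc0]

theorem runsAux_pos (xs : List Int) : ∀ c : Int, 0 < c →
    runsAux c xs = (c + ((xs.takeWhile (· == (1 : Int))).length : Int)) ::
      runsAux 0 (xs.dropWhile (· == (1 : Int))) := by
  induction xs with
  | nil =>
    intro c hc
    rw [runsAux, if_pos (by omega)]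
    simp [runsAux]
  | cons x xs ih =>
    intro c hc
    by_cases hx : x = 1
    · rw [runsAux, if_pos hx, ih (c + 1) (by omega)]
      simp [hx]
      omega
    · rw [runsAux, if_neg hx, if_pos (by omega : c ≠ 0)]
      have h1 : runsAux 0 (x :: xs) = runsAux 0 xs := by
        rw [runsAux, if_neg hx]; simp
      simp [hx, h1]

theorem runsAux_append_not_mem (pre : List Int) (ys : List Int)
    (h : (1 : Int) ∉ pre) : runsAux 0 (pre ++ ys) = runsAux 0 ys := by
  induction pre with
  | nil => rfl
  | cons x xs ih =>
    simp only [List.mem_cons, not_or] at h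
    simp [runsAux, Ne.symm h.1, ih h.2]

theorem drop_takeWhile_len (p : Int → Bool) (xs : List Int) :
    xs.drop (xs.takeWhile p).length = xs.dropWhile p := by
  induction xs with
  | nil => simp
  | cons x xs ih =>
    by_cases h : p x <;> simp [h, ih]

theorem pvRunEnd_eq_aux (xs : List Int) : ∀ (n j : Nat), xs.length - j ≤ n →
    pvRunEnd xs j = j + ((xs.drop j).takeWhile (· == (1 : Int))).length := by
  intro n
  induction n with
  | zero =>
    intro j hj
    rw [pvRunEnd, dif_neg (by omega), List.drop_of_length_le (by omega)]
    simp
  | succ n ih =>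
    intro j hj
    by_cases h : j < xs.length
    · rw [pvRunEnd, dif_pos h]
      by_cases h1 : xs[j] = 1
      · rw [if_pos h1, ih (j + 1) (by omega),
            List.drop_eq_getElem_cons h, List.takeWhile_cons]
        simp [h1]
        omega
      · rw [if_neg h1, List.drop_eq_getElem_cons h, List.takeWhile_cons]
        simp [h1]
    · rw [pvRunEnd, dif_neg h, List.drop_of_length_le (by omega)]
      simp

theorem pvRunEnd_eq (xs : List Int) (j : Nat) :
    pvRunEnd xs j = j + ((xs.drop j).takeWhile (· == (1 : Int))).length :=
  pvRunEnd_eq_aux xs (xs.length - j) j le_rfl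

-- ===== VERDICT (by name: the statement is the Claim_ definition above) =====
theorem if_one_block_spec : Claim_equal_if_one_block := by
  intro line target _
  unfold Spec_if_one_block
  rw [A_eq_runs]
  unfold if_one_block_alt
  cases hidx : PySem.List.index? line 1 with
  | none =>
    rw [PySem.List.index?_eq_none_iff] at hidx
    simp [runsAux_of_not_mem line hidx]
  | some i =>
    rw [PySem.List.index?_eq_some_iff] at hidx
    obtain ⟨pre, suf, hline, hlen, hpre⟩ := hidx
    subst hline; subst hlen
    simp only
    set L := (suf.takeWhile (· == (1 : Int))).length with hL
    have hj : pvRunEnd (pre ++ 1 :: suf) pre.length = pre.length + (L + 1) := by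
      rw [pvRunEnd_eq, List.drop_left, List.takeWhile_cons]
      simp [hL]
    have hdrop : (pre ++ 1 :: suf).drop (pre.length + (L + 1)) =
        suf.dropWhile (· == (1 : Int)) := by
      rw [List.drop_length_add_append, List.drop_succ_cons, hL, drop_takeWhile_len]
    rw [hj, PySem.List.slice_from_natCast, hdrop,
        runsAux_append_not_mem pre _ hpre, runsAux, if_pos rfl,
        zero_add, runsAux_pos suf 1 one_pos]
    have hnil := runsAux_eq_nil_iff (suf.dropWhile (· == (1 : Int))) 0 le_rfl
    by_cases hmem : (1 : Int) ∈ suf.dropWhile (· == (1 : Int))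
    · have hne : runsAux 0 (suf.dropWhile (· == (1 : Int))) ≠ [] := by
        intro h0; exact (hnil.mp h0).2 hmem
      simp [hmem, hne]
    · have he : runsAux 0 (suf.dropWhile (· == (1 : Int))) = [] :=
        hnil.mpr ⟨rfl, hmem⟩
      simp [hmem, he]
      constructor <;> intro h <;> (rw [← h]; ring)
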